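-- pv_equiv track=rewrite | github.com/SimonFernandez25/Autonomous_Defects | src/defect_analysis/ml/ftir_utils.py | get_window_pillars
-- ===== SOURCE A (Python) =====
-- ROWS = 21
--
-- COLS = 21
--
-- WINDOW_HALF = 4       # 9x9 window: center +/- 4 pillars
--
-- def get_window_pillars(center_row, center_col):
--     """
--     Return list of (row, col) for all pillars in the 9x9 window
--     centered on (center_row, center_col).
--
--     All positions are clipped to 1..21.
--     """
--     pillars = []
--     for dr in range(-WINDOW_HALF, WINDOW_HALF + 1):
--         for dc in range(-WINDOW_HALF, WINDOW_HALF + 1):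
--             r = center_row + dr
--             c = center_col + dc
--             if 1 <= r <= ROWS and 1 <= c <= COLS:
--                 pillars.append((r, c))
--     return pillars
-- ===== SOURCE B (Python) =====
-- ROWS = 21
--
-- COLS = 21
--
-- WINDOW_HALF = 4       # 9x9 window: center +/- 4 pillars
--
-- def get_window_pillars(center_row, center_col):
--     """
--     Return list of (row, col) for all pillars in the 9x9 window
--     centered on (center_row, center_col).
--
--     All positions are clipped to 1..21.
--     """
--     r_lo = max(1, center_row - WINDOW_HALF)
--     n_rows = min(ROWS, center_row + WINDOW_HALF) - r_lo + 1
--     c_lo = max(1, center_col - WINDOW_HALF)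
--     n_cols = min(COLS, center_col + WINDOW_HALF) - c_lo + 1
--     if n_rows <= 0 or n_cols <= 0:
--         return []
--     # One flat counter; each index is decoded into (row, col) by divmod.
--     return [(r_lo + i // n_cols, c_lo + i % n_cols) for i in range(n_rows * n_cols)]
-- ===== Notes on version B (the rewrite author's own statement) =====
-- stated objective: alternative
-- what changed: B replaces A's 81-iteration nested offset scan with a per-element bounds test by a single flat counter over the clamped window size, decoding each index into (row, col) with divmod; no nested loop and no bounds check per element.
import Mathlib
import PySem

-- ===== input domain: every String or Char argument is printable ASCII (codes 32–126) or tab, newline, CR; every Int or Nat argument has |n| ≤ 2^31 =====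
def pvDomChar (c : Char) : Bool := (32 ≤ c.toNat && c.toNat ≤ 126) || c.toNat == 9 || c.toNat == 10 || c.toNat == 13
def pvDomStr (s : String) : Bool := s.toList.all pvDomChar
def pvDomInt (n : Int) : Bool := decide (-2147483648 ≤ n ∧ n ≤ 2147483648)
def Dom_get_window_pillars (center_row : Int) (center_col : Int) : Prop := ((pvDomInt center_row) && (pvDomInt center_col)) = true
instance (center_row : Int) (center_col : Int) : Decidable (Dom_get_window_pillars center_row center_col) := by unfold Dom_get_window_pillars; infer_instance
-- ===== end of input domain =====

-- B drops A's nested offset scan with a per-element bounds test: it runs a single flat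
-- counter over the clamped window size and decodes each index with divmod (objective: alternative).

-- ===== PORT A =====
def get_window_pillars (center_row : Int) (center_col : Int) : List (Int × Int) :=
  (PySem.List.pyRange (-4) (4 + 1) 1).foldl (fun pillars dr =>
    (PySem.List.pyRange (-4) (4 + 1) 1).foldl (fun pillars dc =>
      let r := center_row + dr
      let c := center_col + dc
      if 1 ≤ r ∧ r ≤ 21 ∧ 1 ≤ c ∧ c ≤ 21 then pillars ++ [(r, c)] else pillars)
      pillars) []

-- ===== PORT B =====
def get_window_pillars_alt (center_row : Int) (center_col : Int) : List (Int × Int) :=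
  let r_lo := max 1 (center_row - 4)
  let n_rows := min 21 (center_row + 4) - r_lo + 1
  let c_lo := max 1 (center_col - 4)
  let n_cols := min 21 (center_col + 4) - c_lo + 1
  if n_rows ≤ 0 ∨ n_cols ≤ 0 then []
  else
    (PySem.List.pyRange 0 (n_rows * n_cols) 1).map
      (fun i => (r_lo + PySem.Int.floordiv i n_cols, c_lo + PySem.Int.mod i n_cols))

-- ===== PRECONDITION & SPEC =====
def Spec_get_window_pillars (center_row : Int) (center_col : Int) (out : List (Int × Int)) : Prop := out = get_window_pillars_alt center_row center_col
instance (center_row : Int) (center_col : Int) (out : List (Int × Int)) : Decidable (Spec_get_window_pillars center_row center_col out) := by unfold Spec_get_window_pillars; infer_instance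

-- ===== CLAIM (what is proved, stated in full; the proofs are below) =====
def Claim_equal_get_window_pillars : Prop := ∀ (center_row : Int) (center_col : Int), Dom_get_window_pillars center_row center_col → Spec_get_window_pillars center_row center_col (get_window_pillars center_row center_col)

-- ===== LEMMAS AND PROOFS =====

-- One row of A's scan: the filtered column offsets are exactly the clamped column range.
theorem pv_col_aux (r cc : Int) : ∀ (n : Nat) (a b : Int), (b - a).toNat ≤ n →
    ((PySem.List.pyRange a b 1).filter
        (fun dc => decide (1 ≤ cc + dc ∧ cc + dc ≤ 21))).map (fun dc => (r, cc + dc))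
    = (PySem.List.pyRange (max (cc + a) 1) (min (cc + b) 22) 1).map (fun c => (r, c)) := by
  intro n
  induction n with
  | zero =>
    intro a b h
    rw [PySem.List.pyRange_one_eq_nil (by omega), PySem.List.pyRange_one_eq_nil (by omega)]
    simp
  | succ n ih =>
    intro a b h
    by_cases hab : b ≤ a
    · rw [PySem.List.pyRange_one_eq_nil hab, PySem.List.pyRange_one_eq_nil (by omega)]
      simp
    · rw [PySem.List.pyRange_one_cons (show a < b by omega)]
      by_cases hc : 1 ≤ cc + a ∧ cc + a ≤ 21
      · rw [List.filter_cons_of_pos (by simpa using hc)]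
        simp only [List.map_cons]
        rw [ih (a + 1) b (by omega)]
        have h1 : max (cc + a) 1 = cc + a := by omega
        have h2 : cc + a < min (cc + b) 22 := by omega
        have h3 : max (cc + (a + 1)) 1 = cc + a + 1 := by omega
        rw [h1, PySem.List.pyRange_one_cons h2, List.map_cons, h3]
      · rw [List.filter_cons_of_neg (by simpa using hc)]
        rw [ih (a + 1) b (by omega)]
        by_cases hlo : cc + a < 1
        · have : max (cc + (a + 1)) 1 = max (cc + a) 1 := by omega
          rw [this]
        · rw [PySem.List.pyRange_one_eq_nil (by omega), PySem.List.pyRange_one_eq_nil (by omega)]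

theorem pv_col_lemma (r cc a b : Int) :
    ((PySem.List.pyRange a b 1).filter
        (fun dc => decide (1 ≤ cc + dc ∧ cc + dc ≤ 21))).map (fun dc => (r, cc + dc))
    = (PySem.List.pyRange (max (cc + a) 1) (min (cc + b) 22) 1).map (fun c => (r, c)) :=
  pv_col_aux r cc (b - a).toNat a b le_rfl

-- A's whole double scan over row offsets in [a,b) equals the nested clamped ranges.
theorem pv_row_aux (cr cc : Int) : ∀ (n : Nat) (a b : Int), (b - a).toNat ≤ n →
    (PySem.List.pyRange a b 1).flatMap (fun dr =>
      ((PySem.List.pyRange (-4) (4 + 1) 1).filter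
          (fun dc => decide (1 ≤ cr + dr ∧ cr + dr ≤ 21 ∧ 1 ≤ cc + dc ∧ cc + dc ≤ 21))).map
        (fun dc => (cr + dr, cc + dc)))
    = (PySem.List.pyRange (max (cr + a) 1) (min (cr + b) 22) 1).flatMap (fun r =>
        (PySem.List.pyRange (max 1 (cc - 4)) (min 21 (cc + 4) + 1) 1).map (fun c => (r, c))) := by
  intro n
  induction n with
  | zero =>
    intro a b h
    rw [PySem.List.pyRange_one_eq_nil (a := a) (b := b) (by omega),
        PySem.List.pyRange_one_eq_nil (a := max (cr + a) 1) (b := min (cr + b) 22) (by omega)]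
    simp
  | succ n ih =>
    intro a b h
    by_cases hab : b ≤ a
    · rw [PySem.List.pyRange_one_eq_nil (a := a) (b := b) hab,
          PySem.List.pyRange_one_eq_nil (a := max (cr + a) 1) (b := min (cr + b) 22) (by omega)]
      simp
    · rw [PySem.List.pyRange_one_cons (show a < b by omega), List.flatMap_cons]
      by_cases hr : 1 ≤ cr + a ∧ cr + a ≤ 21
      · rw [List.filter_congr (fun dc _ => by simp [hr.1, hr.2] :
              ∀ dc ∈ PySem.List.pyRange (-4) (4 + 1) 1,
                (decide (1 ≤ cr + a ∧ cr + a ≤ 21 ∧ 1 ≤ cc + dc ∧ cc + dc ≤ 21))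
                  = decide (1 ≤ cc + dc ∧ cc + dc ≤ 21))]
        rw [pv_col_lemma (cr + a) cc (-4) (4 + 1)]
        rw [ih (a + 1) b (by omega)]
        have e1 : max (cc + -4) 1 = max 1 (cc - 4) := by omega
        have e2 : min (cc + (4 + 1)) 22 = min 21 (cc + 4) + 1 := by omega
        have h1 : max (cr + a) 1 = cr + a := by omega
        have h2 : cr + a < min (cr + b) 22 := by omega
        have h3 : max (cr + (a + 1)) 1 = cr + a + 1 := by omega
        rw [e1, e2, h1, h3, PySem.List.pyRange_one_cons h2, List.flatMap_cons]
      · have hnil : ((PySem.List.pyRange (-4) (4 + 1) 1).filter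
            (fun dc => decide (1 ≤ cr + a ∧ cr + a ≤ 21 ∧ 1 ≤ cc + dc ∧ cc + dc ≤ 21))) = [] := by
          apply List.filter_eq_nil_iff.mpr
          intro dc _
          simp only [decide_eq_true_eq]
          intro hcon
          exact hr ⟨hcon.1, hcon.2.1⟩
        rw [hnil, List.map_nil, List.nil_append]
        rw [ih (a + 1) b (by omega)]
        by_cases hlo : cr + a < 1
        · have : max (cr + (a + 1)) 1 = max (cr + a) 1 := by omega
          rw [this]
        · have h21 : 21 < cr + a := by
            rcases lt_or_ge 21 (cr + a) with h' | h'
            · exact h'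
            · exact absurd ⟨by omega, by omega⟩ hr
          rw [PySem.List.pyRange_one_eq_nil
                (a := max (cr + (a + 1)) 1) (b := min (cr + b) 22) (by omega),
              PySem.List.pyRange_one_eq_nil
                (a := max (cr + a) 1) (b := min (cr + b) 22) (by omega)]

-- Nat form of the divmod decoding: a flat counter over m*n decoded by div/mod
-- enumerates the m×n grid row by row.
theorem pv_divmod_nat {α : Type} (f : Nat → Nat → α) :
    ∀ (m n : Nat), (List.range (m * n)).map (fun i => f (i / n) (i % n))
      = (List.range m).flatMap (fun k => (List.range n).map (fun j => f k j)) := by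
  intro m n
  induction m with
  | zero => simp
  | succ m ih =>
    by_cases hn : n = 0
    · subst hn; simp
    · have hmul : (m + 1) * n = m * n + n := by ring
      rw [hmul, List.range_add, List.map_append, ih, List.range_succ, List.flatMap_append]
      congr 1
      rw [List.map_map]
      simp only [List.flatMap_cons, List.flatMap_nil, List.append_nil]
      apply List.map_congr_left
      intro j hj
      have hj' : j < n := List.mem_range.mp hj
      have hd : (m * n + j) / n = m := by
        rw [Nat.add_comm, Nat.add_mul_div_right _ _ (Nat.pos_of_ne_zero hn),
            Nat.div_eq_of_lt hj']
        omega
      have hmn : (m * n + j) % n = j := by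
        rw [Nat.add_comm, Nat.add_mul_mod_self_right, Nat.mod_eq_of_lt hj']
      show f ((m * n + j) / n) ((m * n + j) % n) = f m j
      rw [hd, hmn]

-- Int form: for positive counts, the divmod-decoded flat range equals the nested ranges.
theorem pv_divmod_int (r_lo c_lo nr nc : Int) (hnr : 0 < nr) (hnc : 0 < nc) :
    (PySem.List.pyRange 0 (nr * nc) 1).map
      (fun i => (r_lo + PySem.Int.floordiv i nc, c_lo + PySem.Int.mod i nc))
    = (PySem.List.pyRange r_lo (r_lo + nr) 1).flatMap (fun r =>
        (PySem.List.pyRange c_lo (c_lo + nc) 1).map (fun c => (r, c))) := by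
  have hm : nr = (nr.toNat : Int) := (Int.toNat_of_nonneg (by omega)).symm
  have hn : nc = (nc.toNat : Int) := (Int.toNat_of_nonneg (by omega)).symm
  have hMN : (nr * nc - 0).toNat = nr.toNat * nc.toNat := by
    conv_lhs => rw [sub_zero, hm, hn, ← Nat.cast_mul]
    rw [Int.toNat_natCast]
  have hR : (r_lo + nr - r_lo).toNat = nr.toNat := by omega
  have hC : (c_lo + nc - c_lo).toNat = nc.toNat := by omega
  have key := pv_divmod_nat
      (fun k j => ((r_lo + (k : Int), c_lo + (j : Int)) : Int × Int)) nr.toNat nc.toNat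
  trans ((List.range (nr.toNat * nc.toNat)).map
      (fun i => (r_lo + ((i / nc.toNat : Nat) : Int), c_lo + ((i % nc.toNat : Nat) : Int))))
  · rw [PySem.List.pyRange_one, hMN, List.map_map]
    apply List.map_congr_left
    intro k _
    show (r_lo + PySem.Int.floordiv (0 + (k : Int)) nc,
          c_lo + PySem.Int.mod (0 + (k : Int)) nc) = _
    rw [zero_add, hn, PySem.Int.floordiv_natCast, PySem.Int.mod_natCast]
    simp only [Int.toNat_natCast]
  · rw [key, PySem.List.pyRange_one r_lo, PySem.List.pyRange_one c_lo, hR, hC,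
        List.flatMap_map]
    simp only [Function.comp_def, List.map_map]

-- ===== VERDICT (by name: the statement is the Claim_ definition above) =====
theorem get_window_pillars_spec : Claim_equal_get_window_pillars := by
  intro cr cc _
  unfold Spec_get_window_pillars get_window_pillars get_window_pillars_alt
  simp only [PySem.List.foldl_append_ite, PySem.List.foldl_append_eq_flatMap, List.nil_append]
  rw [pv_row_aux cr cc (4 + 1 - -4).toNat (-4) (4 + 1) le_rfl]
  have e1 : max (cr + -4) 1 = max 1 (cr - 4) := by omega
  have e2 : min (cr + (4 + 1)) 22 = min 21 (cr + 4) + 1 := by omega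
  rw [e1, e2]
  set r_lo := max 1 (cr - 4) with hr_lo
  set c_lo := max 1 (cc - 4) with hc_lo
  set nr := min 21 (cr + 4) - r_lo + 1 with hnr
  set nc := min 21 (cc + 4) - c_lo + 1 with hnc
  by_cases hdeg : nr ≤ 0 ∨ nc ≤ 0
  · rw [if_pos hdeg]
    rcases hdeg with h | h
    · rw [PySem.List.pyRange_one_eq_nil (show min 21 (cr + 4) + 1 ≤ r_lo by omega)]
      simp
    · exact List.flatMap_eq_nil_iff.mpr (fun r _ => by
        rw [PySem.List.pyRange_one_eq_nil (show min 21 (cc + 4) + 1 ≤ c_lo by omega)]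
        simp)
  · rw [not_or, not_le, not_le] at hdeg
    rw [if_neg (by omega)]
    have e3 : min 21 (cr + 4) + 1 = r_lo + nr := by omega
    have e4 : min 21 (cc + 4) + 1 = c_lo + nc := by omega
    rw [e3, e4, pv_divmod_int r_lo c_lo nr nc hdeg.1 hdeg.2]
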